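-- pv_equiv track=rewrite | github.com/BAMG-Studio/Generic | forge_platform/backend/app/models/rbac.py | has_scope
-- ===== SOURCE A (Python) =====
-- def has_scope(token_scopes: str, required_scope: str) -> bool:
--     """Check if token has required scope"""
--     scopes = [s.strip() for s in token_scopes.split(",")]
--
--     # Check for wildcard scopes
--     if required_scope in scopes:
--         return True
--
--     # Check for wildcard patterns (e.g., read:* matches read:audits)
--     for scope in scopes:
--         if scope.endswith(":*"):
--             prefix = scope[:-1]  # Remove *
--             if required_scope.startswith(prefix):
--                 return True
--
--     return False
-- ===== SOURCE B (Python) =====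
-- def has_scope(token_scopes: str, required_scope: str) -> bool:
--     """Check if token has required scope.
--
--     Inverted lookup: index the scopes in a set once, then instead of scanning
--     every scope for a wildcard, generate the only wildcard patterns that could
--     match required_scope (one per ':' boundary in it) and look each up.
--     """
--     scopes = {s.strip() for s in token_scopes.split(",")}
--     if required_scope in scopes:
--         return True
--     return any(
--         required_scope[:i] + "*" in scopes
--         for i in range(1, len(required_scope) + 1)
--         if required_scope[i - 1] == ":"
--     )
-- ===== Notes on version B (the rewrite author's own statement) =====
-- stated objective: alternative
-- what changed: Inverts the wildcard search: instead of scanning every scope for a ':*' pattern matching required_scope, B indexes the scopes in a set once and generates the only candidate wildcard patterns (required_scope[:i]+'*' at each ':' boundary of required_scope), looking each up by hash.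
import Mathlib
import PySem

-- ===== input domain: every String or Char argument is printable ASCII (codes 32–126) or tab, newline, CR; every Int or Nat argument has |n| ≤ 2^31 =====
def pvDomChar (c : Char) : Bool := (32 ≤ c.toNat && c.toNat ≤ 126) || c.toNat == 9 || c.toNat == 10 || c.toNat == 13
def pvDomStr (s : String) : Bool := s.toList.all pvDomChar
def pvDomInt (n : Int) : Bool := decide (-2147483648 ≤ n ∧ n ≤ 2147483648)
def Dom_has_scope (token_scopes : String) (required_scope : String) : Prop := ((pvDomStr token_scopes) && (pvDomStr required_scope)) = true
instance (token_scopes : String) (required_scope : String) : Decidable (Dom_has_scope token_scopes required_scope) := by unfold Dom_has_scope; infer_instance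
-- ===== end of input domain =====

-- B inverts the wildcard search: it indexes the scopes in a set and looks up the candidate
-- patterns required_scope[:i]+"*" generated at each ':' of required_scope; objective: alternative.

-- ===== PORT A =====
-- the wildcard for-loop of A, with its early return (on code points; PySem.Chars are the definitions)
def hasScopeWildLoop (scopes : List (List Char)) (r : List Char) : Bool :=
  match scopes with
  | [] => false
  | scope :: rest =>
    if PySem.Chars.endswith scope [':', '*'] then
      if PySem.Chars.startswith r (PySem.List.slice scope none (some (-1))) then
        true
      else hasScopeWildLoop rest r
    else hasScopeWildLoop rest r

def has_scope (token_scopes : String) (required_scope : String) : Bool :=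
  let scopes := ((PySem.Chars.split? token_scopes.toList [',']).getD []).map PySem.Chars.strip
  if scopes.contains required_scope.toList then true
  else hasScopeWildLoop scopes required_scope.toList

-- ===== PORT B =====
def has_scope_alt (token_scopes : String) (required_scope : String) : Bool :=
  let scopes : PySem.Set (List Char) :=
    PySem.Set.ofList (((PySem.Chars.split? token_scopes.toList [',']).getD []).map PySem.Chars.strip)
  if PySem.Set.contains scopes required_scope.toList then true
  else
    (PySem.List.pyRange 1 ((required_scope.toList.length : Int) + 1) 1).any (fun i =>
      (PySem.List.pyGet? required_scope.toList (i - 1) == some ':') &&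
        PySem.Set.contains scopes (PySem.List.slice required_scope.toList none (some i) ++ ['*']))

-- ===== PRECONDITION & SPEC =====
def Spec_has_scope (token_scopes : String) (required_scope : String) (out : Bool) : Prop := out = has_scope_alt token_scopes required_scope
instance (token_scopes : String) (required_scope : String) (out : Bool) : Decidable (Spec_has_scope token_scopes required_scope out) := by unfold Spec_has_scope; infer_instance

-- ===== CLAIM (what is proved, stated in full; the proofs are below) =====
def Claim_equal_has_scope : Prop := ∀ (token_scopes : String) (required_scope : String), Dom_has_scope token_scopes required_scope → Spec_has_scope token_scopes required_scope (has_scope token_scopes required_scope)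

-- ===== LEMMAS AND PROOFS =====

-- A's wildcard loop is the 'any' of its body's test
theorem hasScopeWildLoop_eq_any (r : List Char) (l : List (List Char)) :
    hasScopeWildLoop l r
      = l.any (fun scope => PySem.Chars.endswith scope [':', '*'] &&
          PySem.Chars.startswith r (PySem.List.slice scope none (some (-1)))) := by
  induction l with
  | nil => rfl
  | cons s rest ih =>
    simp only [hasScopeWildLoop, List.any_cons, ← ih]
    split_ifs with h1 h2 <;> simp_all

-- A's wildcard scan over the scopes equals B's candidate generation over required_scope
theorem wild_eq_candidates (r : List Char) (l : List (List Char)) :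
    l.any (fun scope => PySem.Chars.endswith scope [':', '*'] &&
        PySem.Chars.startswith r (PySem.List.slice scope none (some (-1))))
      = (PySem.List.pyRange 1 ((r.length : Int) + 1) 1).any (fun i =>
          (PySem.List.pyGet? r (i - 1) == some ':') &&
            PySem.Set.contains (PySem.Set.ofList l) (PySem.List.slice r none (some i) ++ ['*'])) := by
  rw [PySem.List.pyRange_one]
  have hlen : ((r.length : Int) + 1 - 1).toNat = r.length := by omega
  rw [hlen, List.any_map]
  rw [Bool.eq_iff_iff]
  simp only [List.any_eq_true, List.mem_range, Function.comp_apply,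
    PySem.List.slice_to_neg_one, Bool.and_eq_true, PySem.Chars.endswith_iff,
    PySem.Chars.startswith_iff, beq_iff_eq,
    PySem.Set.contains_eq_listContains, List.contains_eq_mem, PySem.Set.mem_ofList,
    decide_eq_true_eq]
  constructor
  · rintro ⟨s, hs, ⟨q, rfl⟩, hpre⟩
    -- s = q ++ [':','*'], dropLast = q ++ [':'] prefix of r
    have hdl : (q ++ [':', '*']).dropLast = q ++ [':'] := by
      have : q ++ [':', '*'] = (q ++ [':']) ++ ['*'] := by simp
      rw [this, List.dropLast_concat]
    rw [hdl] at hpre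
    obtain ⟨u, rfl⟩ := hpre
    refine ⟨q.length, by simp, ?_, ?_⟩
    · have hi : (((1 : Int) + q.length) - 1) = (q.length : Int) := by omega
      rw [hi, PySem.List.pyGet?_natCast]
      simp
    · have hsl : PySem.List.slice ((q ++ [':']) ++ u) none (some ((1 : Int) + q.length)) = q ++ [':'] := by
        have h1 : ((1:Int) + q.length) = ((q.length + 1 : Nat) : Int) := by push_cast; ring
        rw [h1, PySem.List.slice_to_natCast]
        simp [List.take_append]
      rw [hsl]
      simpa using hs
  · rintro ⟨k, hk, hget, hmem⟩
    have h1 : ((1:Int) + k - 1) = (k : Int) := by omega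
    rw [h1, PySem.List.pyGet?_natCast] at hget
    have hgk : r[k] = ':' := by
      have := List.getElem?_eq_getElem hk
      rw [this] at hget; exact Option.some.inj hget
    have h2 : ((1:Int) + k) = ((k + 1 : Nat) : Int) := by push_cast; ring
    rw [h2, PySem.List.slice_to_natCast] at hmem
    have hts : r.take (k + 1) = r.take k ++ [':'] := by
      rw [List.take_add_one, List.getElem?_eq_getElem hk, hgk]; rfl
    refine ⟨r.take (k + 1) ++ ['*'], hmem, ?_, ?_⟩
    · exact ⟨r.take k, by rw [hts]; simp⟩
    · rw [List.dropLast_concat]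
      exact List.take_prefix _ _

-- ===== VERDICT (by name: the statement is the Claim_ definition above) =====
theorem has_scope_spec : Claim_equal_has_scope := by
  intro t r _
  show has_scope t r = has_scope_alt t r
  unfold has_scope has_scope_alt
  dsimp only
  rw [hasScopeWildLoop_eq_any, wild_eq_candidates]
  congr 1
  simp only [PySem.Set.contains_eq_listContains, List.contains_eq_mem, PySem.Set.mem_ofList]
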